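-- pv_equiv track=rewrite | github.com/mattrobinsonsre/terrapod | services/terrapod/auth/connectors/oidc.py | _strip_role_prefixes
-- ===== SOURCE A (Python) =====
-- def _strip_role_prefixes(groups: list[str], prefixes: list[str]) -> list[str]:
--     """Strip configured prefixes from group names to derive role names.
--
--     e.g., with prefix 'terrapod-', group 'terrapod-admin' becomes role 'admin'.
--     Groups without a matching prefix are passed through unchanged.
--     """
--     if not prefixes:
--         return groups
--
--     result = []
--     for g in groups:
--         stripped = False
--         for prefix in prefixes:
--             if g.startswith(prefix):
--                 result.append(g[len(prefix) :])
--                 stripped = True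
--                 break
--         if not stripped:
--             result.append(g)
--     return result
-- ===== SOURCE B (Python) =====
-- def _strip_role_prefixes(groups: list[str], prefixes: list[str]) -> list[str]:
--     """Strip the first matching configured prefix from each group name.
--
--     Loop-interchanged: one whole-list pass per prefix, with a 'done' flag so
--     a group is stripped by at most one (the earliest matching) prefix.
--     """
--     if not prefixes:
--         return groups
--     pending = [(False, g) for g in groups]
--     for p in prefixes:
--         pending = [
--             (True, g[len(p):]) if (not done and g.startswith(p)) else (done, g)
--             for done, g in pending
--         ]
--     return [g for _, g in pending]
-- ===== Notes on version B (the rewrite author's own statement) =====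
-- stated objective: alternative
-- what changed: Interchanges the loops: instead of scanning all prefixes inside a per-group loop with a break, B makes one whole-list pass per prefix over (done, value) pairs, marking a group done when first stripped so only the earliest matching prefix applies.
import Mathlib
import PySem

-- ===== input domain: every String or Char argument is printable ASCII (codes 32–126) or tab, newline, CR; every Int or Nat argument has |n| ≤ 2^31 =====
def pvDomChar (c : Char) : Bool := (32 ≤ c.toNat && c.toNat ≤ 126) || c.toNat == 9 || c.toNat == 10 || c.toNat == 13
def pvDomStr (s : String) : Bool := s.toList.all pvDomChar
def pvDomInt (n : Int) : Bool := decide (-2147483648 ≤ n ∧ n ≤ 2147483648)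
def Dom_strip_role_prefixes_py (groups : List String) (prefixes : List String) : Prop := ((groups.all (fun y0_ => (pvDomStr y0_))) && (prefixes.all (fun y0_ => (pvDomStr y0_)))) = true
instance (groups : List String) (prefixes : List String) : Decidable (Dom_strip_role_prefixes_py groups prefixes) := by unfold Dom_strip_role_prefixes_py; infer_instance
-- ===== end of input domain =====

-- B interchanges the loops: one whole-list pass per prefix over (done, value) pairs (alternative decomposition, same cost).

-- ===== PORT A =====
-- inner 'for prefix in prefixes' loop: appends g[len(prefix):] and breaks on the first match;
-- returns the (possibly extended) result list and the 'stripped' flag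
def pvAInner (g : String) (prefixes : List String) (result : List String) : List String × Bool :=
  match prefixes with
  | [] => (result, false)
  | p :: ps =>
    if PySem.Str.startswith g p then
      (result ++ [PySem.Str.slice g (some (p.length : Int)) none], true)
    else
      pvAInner g ps result

-- outer 'for g in groups' loop over the accumulator
def pvAOuter (groups : List String) (prefixes : List String) (result : List String) : List String :=
  match groups with
  | [] => result
  | g :: gs =>
    let r := pvAInner g prefixes result
    pvAOuter gs prefixes (if r.2 then r.1 else r.1 ++ [g])

def strip_role_prefixes_py (groups : List String) (prefixes : List String) : List String :=
  if prefixes = [] then groups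
  else pvAOuter groups prefixes []

-- ===== PORT B =====
-- one element of B's per-prefix pass: strip and mark done on first match
def pvStep (st : Bool × String) (p : String) : Bool × String :=
  if !st.1 && PySem.Str.startswith st.2 p then
    (true, PySem.Str.slice st.2 (some (p.length : Int)) none)
  else st

-- one whole-list pass for prefix p (the list comprehension in B)
def pvPass (pending : List (Bool × String)) (p : String) : List (Bool × String) :=
  pending.map (fun st => pvStep st p)

def strip_role_prefixes_py_alt (groups : List String) (prefixes : List String) : List String :=
  if prefixes = [] then groups
  else (prefixes.foldl pvPass (groups.map (fun g => (false, g)))).map Prod.snd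

-- ===== PRECONDITION & SPEC =====
def Spec_strip_role_prefixes_py (groups : List String) (prefixes : List String) (out : List String) : Prop := out = strip_role_prefixes_py_alt groups prefixes
instance (groups : List String) (prefixes : List String) (out : List String) : Decidable (Spec_strip_role_prefixes_py groups prefixes out) := by unfold Spec_strip_role_prefixes_py; infer_instance

-- ===== CLAIM (what is proved, stated in full; the proofs are below) =====
def Claim_equal_strip_role_prefixes_py : Prop := ∀ (groups : List String) (prefixes : List String), Dom_strip_role_prefixes_py groups prefixes → Spec_strip_role_prefixes_py groups prefixes (strip_role_prefixes_py groups prefixes)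

-- ===== LEMMAS AND PROOFS =====
-- folding B's passes over a list = mapping the per-element prefix fold
theorem foldl_pvPass_map (prefixes : List String) (xs : List (Bool × String)) :
    prefixes.foldl pvPass xs = xs.map (fun st => prefixes.foldl pvStep st) := by
  induction prefixes generalizing xs with
  | nil => simp
  | cons p ps ih => simp [List.foldl_cons, pvPass, ih, Function.comp]

-- a done state is fixed by further steps
theorem foldl_pvStep_done (prefixes : List String) (s : String) :
    prefixes.foldl pvStep (true, s) = (true, s) := by
  induction prefixes with
  | nil => rfl
  | cons p ps ih => simp [List.foldl_cons, pvStep, ih]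

-- per element, B's prefix fold computes exactly what A's inner loop appends
theorem foldl_pvStep_eq (prefixes : List String) (g : String) :
    (prefixes.foldl pvStep (false, g)).2 =
      match prefixes.find? (fun p => PySem.Str.startswith g p) with
      | none => g
      | some m => PySem.Str.slice g (some (m.length : Int)) none := by
  induction prefixes with
  | nil => simp
  | cons p ps ih =>
    by_cases h : PySem.Chars.startswith g.toList p.toList = true
    · simp [List.foldl_cons, pvStep, PySem.Str.startswith, h, List.find?, foldl_pvStep_done]
    · simp [List.foldl_cons, pvStep, PySem.Str.startswith, h, List.find?, ih]

-- A's inner loop either appends the stripped value of the FIRST matching prefix (flag true) or leaves result unchanged (flag false)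
theorem pvAInner_eq (g : String) (prefixes : List String) (result : List String) :
    pvAInner g prefixes result =
      match prefixes.find? (fun p => PySem.Str.startswith g p) with
      | none => (result, false)
      | some m => (result ++ [PySem.Str.slice g (some (m.length : Int)) none], true) := by
  induction prefixes with
  | nil => simp [pvAInner]
  | cons p ps ih =>
    by_cases h : PySem.Chars.startswith g.toList p.toList = true
    · simp [pvAInner, PySem.Str.startswith, h, List.find?]
    · simp [pvAInner, PySem.Str.startswith, h, List.find?, ih]

-- A's outer loop = map of the per-element value
theorem pvAOuter_eq (groups : List String) (prefixes : List String) (result : List String) :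
    pvAOuter groups prefixes result =
      result ++ groups.map (fun g => (prefixes.foldl pvStep (false, g)).2) := by
  induction groups generalizing result with
  | nil => simp [pvAOuter]
  | cons g gs ih =>
    simp only [pvAOuter, pvAInner_eq, List.map_cons]
    cases hf : prefixes.find? (fun p => PySem.Chars.startswith g.toList p.toList) with
    | none => simp [PySem.Str.startswith, hf, ih, foldl_pvStep_eq]
    | some m => simp [PySem.Str.startswith, hf, ih, foldl_pvStep_eq]

-- ===== VERDICT (by name: the statement is the Claim_ definition above) =====
theorem strip_role_prefixes_py_spec : Claim_equal_strip_role_prefixes_py := by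
  intro groups prefixes _
  unfold Spec_strip_role_prefixes_py strip_role_prefixes_py strip_role_prefixes_py_alt
  by_cases h : prefixes = []
  · simp [h]
  · simp [h, pvAOuter_eq, foldl_pvPass_map, Function.comp]
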